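-- pv_equiv track=rewrite | github.com/HITOfficial/College | ASD/podprogramy/binary_insert.py | smallest_or_equal
-- ===== SOURCE A (Python) =====
-- def smallest_or_equal(Arr,l,r,k,last=None): # idex ostatniego elementu mniejszego lub równego
--     if l > r:
--         if last is not None:
--             return last
--         else:
--             return -1
--     half = (r+l)//2 # element środkowy
--     if Arr[half] <= k:
--         return smallest_or_equal(Arr,half+1,r,k,half)
--     else:
--         return smallest_or_equal(Arr,l,half-1,k,last)
-- ===== SOURCE B (Python) =====
-- def smallest_or_equal(Arr, l, r, k, last=None):
--     # Pure divide recursion: no accumulator threaded; the hit index is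
--     # returned as an Optional and combined on the way OUT of the recursion.
--     def search(lo, hi):
--         if lo > hi:
--             return None
--         half = (lo + hi) // 2
--         if Arr[half] <= k:
--             res = search(half + 1, hi)
--             return res if res is not None else half
--         else:
--             return search(lo, half - 1)
--     res = search(l, r)
--     if res is not None:
--         return res
--     if last is not None:
--         return last
--     return -1
-- ===== Notes on version B (the rewrite author's own statement) =====
-- stated objective: alternative
-- what changed: A threads the running answer through an accumulator parameter `last` and returns it at the base case; B drops the accumulator entirely: a pure divide recursion returns the hit index as an Optional, combined on the way out of the recursion (`res if res is not None else half`), with the caller-supplied `last` seed applied only once at the end.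
-- outside the precondition, e.g. on smallest_or_equal([1], 0, 5, 7, None): A raises IndexError, B raises IndexError; on smallest_or_equal([1, 2], -6, 1, 10, None): A raises IndexError, B raises IndexError
import Mathlib
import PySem

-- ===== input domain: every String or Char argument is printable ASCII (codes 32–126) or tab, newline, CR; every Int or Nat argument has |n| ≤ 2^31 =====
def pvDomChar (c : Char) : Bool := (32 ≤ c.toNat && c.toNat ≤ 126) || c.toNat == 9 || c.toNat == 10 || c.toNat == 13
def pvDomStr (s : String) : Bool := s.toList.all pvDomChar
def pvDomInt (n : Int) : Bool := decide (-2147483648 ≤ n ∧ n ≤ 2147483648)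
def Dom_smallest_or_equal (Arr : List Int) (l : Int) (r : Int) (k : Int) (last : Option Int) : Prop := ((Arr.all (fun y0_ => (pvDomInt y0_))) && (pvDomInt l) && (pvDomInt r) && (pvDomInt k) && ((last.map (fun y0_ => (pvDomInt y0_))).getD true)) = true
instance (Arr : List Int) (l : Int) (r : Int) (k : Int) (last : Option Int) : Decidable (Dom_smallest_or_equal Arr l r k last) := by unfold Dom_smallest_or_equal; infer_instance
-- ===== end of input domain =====

-- B drops A's accumulator parameter: a pure divide recursion returns the hit index as an
-- Option, combined on the way out; the `last` seed is applied once at the end (alternative).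

-- ===== PORT A =====
-- Literal port of A's accumulator-threading tail recursion; Arr[half] is
-- PySem.List.pyGet? (none = IndexError, unreachable under Pre_, where the port
-- returns the dead-code value 0).
def smallest_or_equal (Arr : List Int) (l : Int) (r : Int) (k : Int) (last : Option Int) : Int :=
  if l > r then
    match last with
    | some v => v
    | none => -1
  else
    let half := PySem.Int.floordiv (r + l) 2
    match PySem.List.pyGet? Arr half with
    | none => 0  -- IndexError in Python; excluded by Pre_
    | some v =>
      if v ≤ k then smallest_or_equal Arr (half + 1) r k (some half)
      else smallest_or_equal Arr l (half - 1) k last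
  termination_by (r - l + 1).toNat
  decreasing_by
  · have h := PySem.Int.floordiv_two_mid_bounds (lo := l) (hi := r) (by omega)
    simp only [Int.add_comm r l] at *; omega
  · have h := PySem.Int.floordiv_two_mid_bounds (lo := l) (hi := r) (by omega)
    simp only [Int.add_comm r l] at *; omega

-- ===== PORT B =====
-- Source B's inner `search`: no accumulator; the hit index comes back as an Option and
-- `res if res is not None else half` combines it on the way out. A `none` from
-- Arr[half] (IndexError in Python, excluded by Pre_) propagates via Option.bind.
def soeSearch (Arr : List Int) (k : Int) (lo : Int) (hi : Int) : Option Int :=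
  if lo > hi then none
  else
    let half := PySem.Int.floordiv (lo + hi) 2
    (PySem.List.pyGet? Arr half).bind fun v =>
      if v ≤ k then
        match soeSearch Arr k (half + 1) hi with
        | some w => some w
        | none => some half
      else soeSearch Arr k lo (half - 1)
  termination_by (hi - lo + 1).toNat
  decreasing_by
  · have h := PySem.Int.floordiv_two_mid_bounds (lo := lo) (hi := hi) (by omega)
    omega
  · have h := PySem.Int.floordiv_two_mid_bounds (lo := lo) (hi := hi) (by omega)
    omega

-- Source B's body: run the search, then the two final `if res/last is not None` returns.
def smallest_or_equal_alt (Arr : List Int) (l : Int) (r : Int) (k : Int) (last : Option Int) : Int :=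
  match soeSearch Arr k l r, last with
  | some res, _ => res
  | none, some v => v
  | none, none => -1

-- ===== PRECONDITION & SPEC =====
-- Pre_ excludes calls whose non-empty search window [l, r] reaches outside the Python
-- index range [-len(Arr), len(Arr)): there the probe Arr[half] in general raises
-- IndexError (on some such inputs negative-index wraparound happens to return a value,
-- which B computes identically, probe for probe).
def Pre_smallest_or_equal (Arr : List Int) (l : Int) (r : Int) (k : Int) (last : Option Int) : Prop :=
  l > r ∨ (-(Arr.length : Int) ≤ l ∧ r < (Arr.length : Int))
instance (Arr : List Int) (l : Int) (r : Int) (k : Int) (last : Option Int) : Decidable (Pre_smallest_or_equal Arr l r k last) := by unfold Pre_smallest_or_equal; infer_instance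

def pvWitness_smallest_or_equal : List Int × Int × Int × Int × Option Int := ([1, 3, 3, 7], 0, 3, 4, none)

def Spec_smallest_or_equal (Arr : List Int) (l : Int) (r : Int) (k : Int) (last : Option Int) (out : Int) : Prop := out = smallest_or_equal_alt Arr l r k last
instance (Arr : List Int) (l : Int) (r : Int) (k : Int) (last : Option Int) (out : Int) : Decidable (Spec_smallest_or_equal Arr l r k last out) := by unfold Spec_smallest_or_equal; infer_instance

-- ===== CLAIM (what is proved, stated in full; the proofs are below) =====
def Claim_equal_smallest_or_equal : Prop := ∀ (Arr : List Int) (l : Int) (r : Int) (k : Int) (last : Option Int), Dom_smallest_or_equal Arr l r k last → Pre_smallest_or_equal Arr l r k last → Spec_smallest_or_equal Arr l r k last (smallest_or_equal Arr l r k last)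

-- ===== LEMMAS AND PROOFS =====

-- Key lemma: A with seed `last` equals the seedless search post-processed by B's final
-- fallbacks, by induction on the window size; Pre_ is the loop invariant.
theorem soe_eq_search (Arr : List Int) (k : Int) : ∀ (l r : Int) (last : Option Int),
    Pre_smallest_or_equal Arr l r k last →
    smallest_or_equal Arr l r k last =
      (match soeSearch Arr k l r, last with
       | some res, _ => res
       | none, some v => v
       | none, none => (-1 : Int)) := by
  intro l r last hpre
  unfold smallest_or_equal soeSearch
  by_cases hlr : l > r
  · simp only [if_pos hlr]
    cases last <;> rfl
  · have hwin : -(Arr.length : Int) ≤ l ∧ r < (Arr.length : Int) := by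
      rcases hpre with h | h
      · omega
      · exact h
    have hmid := PySem.Int.floordiv_two_mid_bounds (lo := l) (hi := r) (by omega)
    have hget : ∃ v, PySem.List.pyGet? Arr (PySem.Int.floordiv (l + r) 2) = some v := by
      cases hv : PySem.List.pyGet? Arr (PySem.Int.floordiv (l + r) 2) with
      | some v => exact ⟨v, rfl⟩
      | none =>
        rw [PySem.List.pyGet?_eq_none_iff] at hv
        exact absurd (by constructor <;> omega) hv
    obtain ⟨v, hv⟩ := hget
    simp only [if_neg hlr, Int.add_comm r l, hv, Option.bind_some]
    by_cases hvk : v ≤ k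
    · simp only [if_pos hvk]
      have ih := soe_eq_search Arr k (PySem.Int.floordiv (l + r) 2 + 1) r
        (some (PySem.Int.floordiv (l + r) 2))
        (by unfold Pre_smallest_or_equal; omega)
      rw [ih]
      cases soeSearch Arr k (PySem.Int.floordiv (l + r) 2 + 1) r <;> rfl
    · simp only [if_neg hvk]
      exact soe_eq_search Arr k l (PySem.Int.floordiv (l + r) 2 - 1) last
        (by unfold Pre_smallest_or_equal; omega)
  termination_by l r => (r - l + 1).toNat
  decreasing_by
  · have h := PySem.Int.floordiv_two_mid_bounds (lo := l) (hi := r) (by omega)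
    omega
  · have h := PySem.Int.floordiv_two_mid_bounds (lo := l) (hi := r) (by omega)
    omega

-- ===== VERDICT (by name: the statement is the Claim_ definition above) =====
theorem smallest_or_equal_spec : Claim_equal_smallest_or_equal := by
  intro Arr l r k last _ hpre
  unfold Spec_smallest_or_equal smallest_or_equal_alt
  exact soe_eq_search Arr k l r last hpre
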